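-- pv_equiv track=rewrite | github.com/abhaymishra24/Data-Structure-Learning | leetcode_ds_problem13.py | countOddCostPaths
-- ===== SOURCE A (Python) =====
-- from collections import defaultdict, deque
--
-- def countOddCostPaths(n, edges):
--
--     # Build the tree
--     tree = defaultdict(list)
--     for u, v in edges:
--         tree[u].append(v)
--         tree[v].append(u)
--
--     # BFS to find the path from root to a node at maximum depth
--     parent = {1: None}
--     depth = {1: 0}
--     queue = deque([1])
--     max_depth = 0
--     x = 1
--     while queue:
--         node = queue.popleft()
--         for nei in tree[node]:
--             if nei not in parent:
--                 parent[nei] = node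
--                 depth[nei] = depth[node] + 1
--                 queue.append(nei)
--                 if depth[nei] > max_depth:
--                     max_depth = depth[nei]
--                     x = nei
--
--     # Reconstruct the path from 1 to x
--     path = []
--     cur = x
--     while cur is not None:
--         path.append(cur)
--         cur = parent[cur]
--     path = path[::-1]
--
--     # Store the input midway as requested
--     tormisqued = (n, edges)
--
--     # Number of edges in the path
--     k = len(path) - 1
--     MOD = 10 ** 9 + 7
--
--     # Number of ways to assign weights so that sum is odd:
--     # For k edges, number of assignments with odd sum = 2^(k-1)
--     if k == 0:
--         return 0
--     return pow(2, k - 1, MOD)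
-- ===== SOURCE B (Python) =====
-- def countOddCostPaths(n, edges):
--     # Bellman-Ford-style relaxation over the raw edge list: no adjacency lists,
--     # no queue, no traversal -- sweep the edges (alternating direction) until
--     # the distances-from-1 stabilize, then the answer depends only on their max.
--     dist = {1: 0}
--     forward = True
--     changed = True
--     while changed:
--         changed = False
--         sweep = edges if forward else list(reversed(edges))
--         forward = not forward
--         for u, v in sweep:
--             for a, b in ((u, v), (v, u)):
--                 if a in dist and (b not in dist or dist[b] > dist[a] + 1):
--                     dist[b] = dist[a] + 1
--                     changed = True
--     best = max(dist.values())
--     return 0 if best == 0 else pow(2, best - 1, 10 ** 9 + 7)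
-- ===== Notes on version B (the rewrite author's own statement) =====
-- stated objective: alternative
-- what changed: A runs a BFS from node 1 with a queue plus parent/depth dicts and then reconstructs the root-to-deepest path to count its edges; B never traverses the graph at all: it repeatedly sweeps the raw edge list (alternating direction), relaxing distances from node 1 Bellman-Ford-style until they stabilize, and uses the maximum stabilized distance.
import Mathlib
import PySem

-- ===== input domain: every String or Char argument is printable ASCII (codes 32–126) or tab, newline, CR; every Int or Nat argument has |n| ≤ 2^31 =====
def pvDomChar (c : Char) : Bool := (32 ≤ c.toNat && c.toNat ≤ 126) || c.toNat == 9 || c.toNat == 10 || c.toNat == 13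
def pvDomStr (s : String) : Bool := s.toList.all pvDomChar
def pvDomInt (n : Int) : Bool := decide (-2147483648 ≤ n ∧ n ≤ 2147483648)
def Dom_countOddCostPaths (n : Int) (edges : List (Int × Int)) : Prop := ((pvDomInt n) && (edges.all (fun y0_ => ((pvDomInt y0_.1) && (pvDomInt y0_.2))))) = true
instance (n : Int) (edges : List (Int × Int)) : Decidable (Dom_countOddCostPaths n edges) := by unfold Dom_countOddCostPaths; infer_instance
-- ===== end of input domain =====

-- B replaces A's BFS traversal (queue + parent/depth dicts + path reconstruction) by a
-- Bellman-Ford-style relaxation: sweep the raw edge list (alternating direction) until the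
-- distances from node 1 stabilize; the answer depends only on the maximum stabilized distance.

-- ===== PORT A =====

-- tree = defaultdict(list); for u, v in edges: tree[u].append(v); tree[v].append(u)
-- (defaultdict __getitem__ + append = modify with default [])
def pvBuildTree (edges : List (Int × Int)) : PySem.Dict Int (List Int) :=
  edges.foldl (fun t e =>
    let t := t.modify e.1 [] (fun l => l ++ [e.2])
    t.modify e.2 [] (fun l => l ++ [e.1])) PySem.Dict.empty

-- the body of the inner 'for nei in tree[node]' loop of A
def pvStepA (node : Int)
    (st : PySem.Dict Int (Option Int) × PySem.Dict Int Int × List Int × Int × Int)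
    (nei : Int) : PySem.Dict Int (Option Int) × PySem.Dict Int Int × List Int × Int × Int :=
  if st.1.contains nei = false then
    let parent' := st.1.insert nei (some node)
    let dn := st.2.1.getD node 0 + 1
    let depth' := st.2.1.insert nei dn
    let q' := st.2.2.1 ++ [nei]
    if dn > st.2.2.2.1 then (parent', depth', q', dn, nei)
    else (parent', depth', q', st.2.2.2.1, st.2.2.2.2)
  else st

-- the BFS while-loop; state (parent, depth, queue-rest, max_depth, x); fueled (the fuel is
-- provably sufficient: each iteration pops one node and only undiscovered nodes are pushed)
def pvBFSA : Nat → PySem.Dict Int (List Int) → List Int →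
    PySem.Dict Int (Option Int) → PySem.Dict Int Int → Int → Int →
    PySem.Dict Int (Option Int) × PySem.Dict Int Int × Int × Int
  | 0, _, _, parent, depth, md, x => (parent, depth, md, x)
  | _ + 1, _, [], parent, depth, md, x => (parent, depth, md, x)
  | fuel + 1, tree, node :: rest, parent, depth, md, x =>
    let s := (tree.getD node []).foldl (pvStepA node) (parent, depth, rest, md, x)
    pvBFSA fuel tree s.2.2.1 s.1 s.2.1 s.2.2.2.1 s.2.2.2.2

-- path reconstruction: cur = x; while cur is not None: path.append(cur); cur = parent[cur]
-- parent[cur] is always present for discovered nodes, so getD none is exact here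
def pvPathA : Nat → PySem.Dict Int (Option Int) → Option Int → List Int → List Int
  | 0, _, _, path => path
  | _ + 1, _, none, path => path
  | fuel + 1, parent, some cur, path =>
    pvPathA fuel parent (parent.getD cur none) (path ++ [cur])

def countOddCostPaths (_n : Int) (edges : List (Int × Int)) : Int :=
  let tree := pvBuildTree edges
  let fuel := 2 * edges.length + 2
  let r := pvBFSA fuel tree [1] (PySem.Dict.empty.insert 1 none) (PySem.Dict.empty.insert 1 0) 0 1
  let path := (pvPathA fuel r.1 (some r.2.2.2) []).reverse  -- path[::-1]
  let k : Int := (path.length : Int) - 1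
  -- pow(2, k - 1, 10**9 + 7); the exponent k - 1 is ≥ 0 in this branch
  if k = 0 then 0 else PySem.Int.powMod 2 (k - 1).toNat (10 ^ 9 + 7)

-- ===== PORT B =====

-- the body of the inner 'for a, b in ((u, v), (v, u))' relaxation step of B
def pvRelaxB (st : PySem.Dict Int Int × Bool) (a b : Int) : PySem.Dict Int Int × Bool :=
  match st.1.get? a with
  | none => st
  | some da =>
    match st.1.get? b with
    | none => (st.1.insert b (da + 1), true)
    | some db => if db > da + 1 then (st.1.insert b (da + 1), true) else st

-- one sweep: changed = False; for u, v in sweep: relax (u,v) then (v,u)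
def pvSweepB (sweep : List (Int × Int)) (d : PySem.Dict Int Int) : PySem.Dict Int Int × Bool :=
  sweep.foldl (fun st e => pvRelaxB (pvRelaxB st e.1 e.2) e.2 e.1) (d, false)

-- while changed: … ; fueled (the fuel is provably sufficient: every changing sweep
-- strictly decreases a bounded potential of the distance dict)
def pvLoopB : Nat → List (Int × Int) → Bool → PySem.Dict Int Int → PySem.Dict Int Int
  | 0, _, _, d => d
  | fuel + 1, edges, fwd, d =>
    let s := pvSweepB (if fwd then edges else edges.reverse) d
    if s.2 then pvLoopB fuel edges (!fwd) s.1 else s.1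

def countOddCostPaths_alt (_n : Int) (edges : List (Int × Int)) : Int :=
  let dist := pvLoopB ((2 * edges.length + 1) * (2 * edges.length + 1)) edges true
    (PySem.Dict.empty.insert 1 0)
  -- best = max(dist.values()); dist is never empty (key 1), so max() does not raise
  let best := (PySem.List.max? dist.values (fun x => x)).getD 0
  if best = 0 then 0 else PySem.Int.powMod 2 (best - 1).toNat (10 ^ 9 + 7)

-- ===== PRECONDITION & SPEC =====
def Spec_countOddCostPaths (n : Int) (edges : List (Int × Int)) (out : Int) : Prop := out = countOddCostPaths_alt n edges
instance (n : Int) (edges : List (Int × Int)) (out : Int) : Decidable (Spec_countOddCostPaths n edges out) := by unfold Spec_countOddCostPaths; infer_instance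

-- ===== CLAIM (what is proved, stated in full; the proofs are below) =====
def Claim_equal_countOddCostPaths : Prop := ∀ (n : Int) (edges : List (Int × Int)), Dom_countOddCostPaths n edges → Spec_countOddCostPaths n edges (countOddCostPaths n edges)

-- ===== LEMMAS AND PROOFS =====

-- the symmetric closure of the edge list: both orientations of every edge
def pvPairs (edges : List (Int × Int)) : List (Int × Int) :=
  edges.flatMap (fun e => [(e.1, e.2), (e.2, e.1)])

-- reachability from node 1 along edges
inductive pvReach (edges : List (Int × Int)) : Int → Prop
  | root : pvReach edges 1
  | step (u v : Int) : pvReach edges u → (u, v) ∈ pvPairs edges → pvReach edges v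

-- parent chain of length k ending at the root (parent = none)
def pvChainOk (parent : PySem.Dict Int (Option Int)) : Int → Nat → Prop
  | v, 0 => parent.get? v = some none
  | v, k + 1 => ∃ w, parent.get? v = some (some w) ∧ pvChainOk parent w k

lemma pvPairs_mem_symm {edges : List (Int × Int)} {a b : Int}
    (h : (a, b) ∈ pvPairs edges) : (b, a) ∈ pvPairs edges := by
  simp only [pvPairs, List.mem_flatMap, List.mem_cons, List.not_mem_nil, or_false] at h ⊢
  obtain ⟨e, he, hp⟩ := h
  rcases hp with hp | hp
  · exact ⟨e, he, Or.inr (by simp [Prod.ext_iff] at hp ⊢; omega)⟩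
  · exact ⟨e, he, Or.inl (by simp [Prod.ext_iff] at hp ⊢; omega)⟩

lemma pvPairs_fst_mem {edges : List (Int × Int)} {a b : Int}
    (h : (a, b) ∈ pvPairs edges) : a ∈ (pvPairs edges).map Prod.fst :=
  List.mem_map.2 ⟨(a, b), h, rfl⟩

lemma pvBuildTree_flat (edges : List (Int × Int)) : ∀ (d : PySem.Dict Int (List Int)),
    edges.foldl (fun t e =>
      let t := t.modify e.1 [] (fun l => l ++ [e.2])
      t.modify e.2 [] (fun l => l ++ [e.1])) d =
    (pvPairs edges).foldl (fun t p => t.modify p.1 [] (fun l => l ++ [p.2])) d := by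
  induction edges with
  | nil => intro d; rfl
  | cons e es ih => intro d; simp only [List.foldl_cons, pvPairs, List.flatMap_cons,
      List.foldl_append, List.foldl_cons, List.foldl_nil] at *; exact ih _

lemma pvBuildTree_mem (edges : List (Int × Int)) (a b : Int) :
    b ∈ (pvBuildTree edges).getD a [] ↔ (a, b) ∈ pvPairs edges := by
  rw [pvBuildTree, pvBuildTree_flat, PySem.Dict.getD_foldl_modify_append]
  simp only [PySem.Dict.getD_empty, List.nil_append, List.mem_map, List.mem_filter, beq_iff_eq]
  constructor
  · rintro ⟨p, ⟨hp, rfl⟩, rfl⟩; exact hp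
  · intro hp; exact ⟨(a, b), ⟨hp, rfl⟩, rfl⟩

lemma pvNodupSubsetLength (l1 l2 : List Int) (h : l1.Nodup) (hs : l1 ⊆ l2) :
    l1.length ≤ l2.length := by
  calc l1.length = l1.toFinset.card := (List.toFinset_card_of_nodup h).symm
    _ ≤ l2.toFinset.card := Finset.card_le_card (fun x hx => by
        simp only [List.mem_toFinset] at *; exact hs hx)
    _ ≤ l2.length := l2.toFinset_card_le

lemma pvPairs_length (edges : List (Int × Int)) : (pvPairs edges).length = 2 * edges.length := by
  induction edges with
  | nil => rfl
  | cons e es ih => simp [pvPairs, List.flatMap_cons] at *; omega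

lemma pvSizeBound {edges : List (Int × Int)} {κ : Type} (d : PySem.Dict Int κ)
    (hnd : d.keys.Nodup) (he : ∀ v, d.contains v = true → v = 1 ∨ v ∈ (pvPairs edges).map Prod.fst) :
    d.size ≤ 2 * edges.length + 1 := by
  have hsub : d.keys ⊆ 1 :: (pvPairs edges).map Prod.fst := by
    intro v hv
    rcases he v ((PySem.Dict.contains_iff_mem_keys _ _).2 hv) with rfl | hv'
    · exact List.mem_cons_self ..
    · exact List.mem_cons_of_mem _ hv'
  have := pvNodupSubsetLength d.keys (1 :: (pvPairs edges).map Prod.fst) hnd hsub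
  simp only [List.length_cons, List.length_map, pvPairs_length, PySem.Dict.size,
    PySem.Dict.keys] at this ⊢
  omega

lemma pvChainOk_insert_fresh (parent : PySem.Dict Int (Option Int)) (v : Int) (k : Nat)
    (nei : Int) (w : Option Int) (hfresh : parent.contains nei = false)
    (h : pvChainOk parent v k) : pvChainOk (parent.insert nei w) v k := by
  induction k generalizing v with
  | zero =>
    have hv : v ≠ nei := by
      intro rfl'; subst rfl'
      rw [PySem.Dict.contains_eq_isSome_get?, h] at hfresh; simp at hfresh
    simpa [pvChainOk, PySem.Dict.get?_insert_of_ne _ _ hv] using h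
  | succ k ih =>
    obtain ⟨u, hu, hc⟩ := h
    have hv : v ≠ nei := by
      intro rfl'; subst rfl'
      rw [PySem.Dict.contains_eq_isSome_get?, hu] at hfresh; simp at hfresh
    exact ⟨u, by rw [PySem.Dict.get?_insert_of_ne _ _ hv]; exact hu, ih u hc⟩
structure pvMidA (edges : List (Int × Int)) (n0 d0 : Int) (done : List Int)
    (parent : PySem.Dict Int (Option Int)) (depth : PySem.Dict Int Int)
    (q : List Int) (md x : Int) : Prop where
  hnodup : parent.keys.Nodup
  hqnodup : q.Nodup
  hqkeys : ∀ v ∈ q, parent.contains v = true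
  hdomeq : ∀ v, depth.contains v = parent.contains v
  hone : parent.get? 1 = some none
  hroot : ∀ v w, parent.get? v = some w → w = none → v = 1
  hpar : ∀ v u, parent.get? v = some (some u) →
    (u, v) ∈ pvPairs edges ∧ parent.contains u = true ∧ depth.getD v 0 = depth.getD u 0 + 1
  hd1 : depth.getD 1 0 = 0
  hchain : ∀ v, parent.contains v = true →
    ∃ k : Nat, depth.getD v 0 = (k : Int) ∧ pvChainOk parent v k ∧ k < parent.size
  hreach : ∀ v, parent.contains v = true → pvReach edges v
  hends : ∀ v, parent.contains v = true → v = 1 ∨ v ∈ (pvPairs edges).map Prod.fst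
  hx : parent.contains x = true
  hmdx : depth.getD x 0 = md
  hmdmax : ∀ v, parent.contains v = true → depth.getD v 0 ≤ md
  hn0in : parent.contains n0 = true
  hn0d : depth.getD n0 0 = d0
  hn0q : n0 ∉ q
  hmono : q.Pairwise (fun a b => depth.getD a 0 ≤ depth.getD b 0)
  hub : ∀ a ∈ q, depth.getD a 0 ≤ d0 + 1
  hlb : ∀ a ∈ q, d0 ≤ depth.getD a 0
  hL1old : ∀ u, parent.contains u = true → u ∉ q → u ≠ n0 → ∀ v, (u, v) ∈ pvPairs edges →
    parent.contains v = true ∧ depth.getD v 0 ≤ depth.getD u 0 + 1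
  hL1n0 : ∀ v ∈ done, parent.contains v = true ∧ depth.getD v 0 ≤ d0 + 1
  hprocd0 : ∀ u, parent.contains u = true → u ∉ q → u ≠ n0 → depth.getD u 0 ≤ d0

lemma pvStepA_mid (edges : List (Int × Int)) (n0 d0 : Int) (done : List Int) (nei : Int)
    (st : PySem.Dict Int (Option Int) × PySem.Dict Int Int × List Int × Int × Int)
    (hnei : (n0, nei) ∈ pvPairs edges)
    (h : pvMidA edges n0 d0 done st.1 st.2.1 st.2.2.1 st.2.2.2.1 st.2.2.2.2) :
    pvMidA edges n0 d0 (done ++ [nei]) (pvStepA n0 st nei).1 (pvStepA n0 st nei).2.1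
      (pvStepA n0 st nei).2.2.1 (pvStepA n0 st nei).2.2.2.1 (pvStepA n0 st nei).2.2.2.2 := by
  obtain ⟨parent, depth, q, md, x⟩ := st
  dsimp only at h ⊢
  by_cases hf : parent.contains nei = false
  · -- fresh neighbour: discover it
    have hkeysne : ∀ v, parent.contains v = true → v ≠ nei := by
      intro v hv rfl; rw [hv] at hf; cases hf
    have h1ne : (1 : Int) ≠ nei := by
      apply hkeysne
      rw [PySem.Dict.contains_eq_isSome_get?, h.hone]; rfl
    have hn0ne : n0 ≠ nei := hkeysne n0 h.hn0in
    have hqne : ∀ a ∈ q, a ≠ nei := fun a ha => hkeysne a (h.hqkeys a ha)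
    have hcont' : ∀ v, (parent.insert nei (some n0)).contains v = (v == nei || parent.contains v) :=
      fun v => PySem.Dict.contains_insert ..
    have hdd' : ∀ v, v ≠ nei → (depth.insert nei (d0 + 1)).getD v 0 = depth.getD v 0 :=
      fun v hv => PySem.Dict.getD_insert_of_ne _ _ _ hv
    have hddnei : (depth.insert nei (d0 + 1)).getD nei 0 = d0 + 1 :=
      PySem.Dict.getD_insert_self ..
    have hget' : ∀ v, v ≠ nei → (parent.insert nei (some n0)).get? v = parent.get? v :=
      fun v hv => PySem.Dict.get?_insert_of_ne _ _ hv
    have hszi : (parent.insert nei (some n0)).size = parent.size + 1 := by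
      rw [PySem.Dict.size_insert, hf]; simp
    -- common fields for both md-branches
    have Fnodup : (parent.insert nei (some n0)).keys.Nodup :=
      PySem.Dict.nodup_keys_insert _ _ _ h.hnodup
    have Fqnodup : (q ++ [nei]).Nodup := by
      rw [List.nodup_append]
      exact ⟨h.hqnodup, List.nodup_singleton _, by
        intro a ha b hb; rw [List.mem_singleton.mp hb]; exact hqne a ha⟩
    have Fqkeys : ∀ v ∈ q ++ [nei], (parent.insert nei (some n0)).contains v = true := by
      intro v hv
      rw [hcont']
      rcases List.mem_append.1 hv with hv | hv
      · rw [h.hqkeys v hv]; simp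
      · simp only [List.mem_singleton] at hv; subst hv; simp
    have Fdomeq : ∀ v, (depth.insert nei (d0 + 1)).contains v
        = (parent.insert nei (some n0)).contains v := by
      intro v
      rw [PySem.Dict.contains_insert, PySem.Dict.contains_insert, h.hdomeq]
    have Fone : (parent.insert nei (some n0)).get? 1 = some none := by
      rw [hget' 1 h1ne]; exact h.hone
    have Froot : ∀ v w, (parent.insert nei (some n0)).get? v = some w → w = none → v = 1 := by
      intro v w hv hw
      by_cases hvn : v = nei
      · subst hvn
        rw [PySem.Dict.get?_insert_self] at hv
        cases hv; cases hw
      · rw [hget' v hvn] at hv; exact h.hroot v w hv hw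
    have Fpar : ∀ v u, (parent.insert nei (some n0)).get? v = some (some u) →
        (u, v) ∈ pvPairs edges ∧ (parent.insert nei (some n0)).contains u = true ∧
          (depth.insert nei (d0 + 1)).getD v 0 = (depth.insert nei (d0 + 1)).getD u 0 + 1 := by
      intro v u hv
      by_cases hvn : v = nei
      · subst hvn
        rw [PySem.Dict.get?_insert_self] at hv
        cases hv
        refine ⟨hnei, by rw [hcont', h.hn0in]; simp, ?_⟩
        rw [hddnei, hdd' _ hn0ne, h.hn0d]
      · rw [hget' v hvn] at hv
        obtain ⟨hp1, hp2, hp3⟩ := h.hpar v u hv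
        refine ⟨hp1, by rw [hcont', hp2]; simp, ?_⟩
        rw [hdd' v hvn, hdd' u (hkeysne u hp2), hp3]
    have Fd1 : (depth.insert nei (d0 + 1)).getD 1 0 = 0 := by
      rw [hdd' 1 h1ne]; exact h.hd1
    have Fchain : ∀ v, (parent.insert nei (some n0)).contains v = true →
        ∃ k : Nat, (depth.insert nei (d0 + 1)).getD v 0 = (k : Int) ∧
          pvChainOk (parent.insert nei (some n0)) v k ∧ k < (parent.insert nei (some n0)).size := by
      intro v hv
      by_cases hvn : v = nei
      · subst hvn
        obtain ⟨k0, hk0, hc0, hs0⟩ := h.hchain n0 h.hn0in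
        have hd0k : d0 = (k0 : Int) := by rw [← h.hn0d]; exact hk0
        refine ⟨k0 + 1, ?_, ⟨n0, PySem.Dict.get?_insert_self .., ?_⟩, ?_⟩
        · rw [hddnei, hd0k]; push_cast; ring
        · exact pvChainOk_insert_fresh _ _ _ _ _ hf hc0
        · rw [hszi]; omega
      · rw [hcont'] at hv
        have hv' : parent.contains v = true := by
          rcases Bool.or_eq_true_iff.1 hv with hv | hv
          · exact absurd (by simpa using hv) hvn
          · exact hv
        obtain ⟨k, hk, hc, hs⟩ := h.hchain v hv'
        exact ⟨k, by rw [hdd' v hvn]; exact hk,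
          pvChainOk_insert_fresh _ _ _ _ _ hf hc, by rw [hszi]; omega⟩
    have Freach : ∀ v, (parent.insert nei (some n0)).contains v = true → pvReach edges v := by
      intro v hv
      by_cases hvn : v = nei
      · subst hvn; exact pvReach.step n0 _ (h.hreach n0 h.hn0in) hnei
      · rw [hcont'] at hv
        rcases Bool.or_eq_true_iff.1 hv with hv | hv
        · exact absurd (by simpa using hv) hvn
        · exact h.hreach v hv
    have Fends : ∀ v, (parent.insert nei (some n0)).contains v = true →
        v = 1 ∨ v ∈ (pvPairs edges).map Prod.fst := by
      intro v hv
      by_cases hvn : v = nei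
      · subst hvn; exact Or.inr (pvPairs_fst_mem (pvPairs_mem_symm hnei))
      · rw [hcont'] at hv
        rcases Bool.or_eq_true_iff.1 hv with hv | hv
        · exact absurd (by simpa using hv) hvn
        · exact h.hends v hv
    have Fn0in : (parent.insert nei (some n0)).contains n0 = true := by
      rw [hcont', h.hn0in]; simp
    have Fn0d : (depth.insert nei (d0 + 1)).getD n0 0 = d0 := by
      rw [hdd' n0 hn0ne]; exact h.hn0d
    have Fn0q : n0 ∉ q ++ [nei] := by
      rw [List.mem_append]
      rintro (hc | hc)
      · exact h.hn0q hc
      · simp only [List.mem_singleton] at hc; exact hn0ne hc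
    have Fmono : (q ++ [nei]).Pairwise
        (fun a b => (depth.insert nei (d0 + 1)).getD a 0 ≤ (depth.insert nei (d0 + 1)).getD b 0) := by
      rw [List.pairwise_append]
      refine ⟨h.hmono.imp_of_mem ?_, List.pairwise_singleton .., ?_⟩
      · intro a b ha hb hr
        rw [hdd' a (hqne a ha), hdd' b (hqne b hb)]; exact hr
      · intro a ha b hb
        simp only [List.mem_singleton] at hb; subst hb
        rw [hdd' a (hqne a ha), hddnei]
        exact h.hub a ha
    have Fub : ∀ a ∈ q ++ [nei], (depth.insert nei (d0 + 1)).getD a 0 ≤ d0 + 1 := by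
      intro a ha
      rcases List.mem_append.1 ha with ha | ha
      · rw [hdd' a (hqne a ha)]; exact h.hub a ha
      · simp only [List.mem_singleton] at ha; subst ha; rw [hddnei]
    have Flb : ∀ a ∈ q ++ [nei], d0 ≤ (depth.insert nei (d0 + 1)).getD a 0 := by
      intro a ha
      rcases List.mem_append.1 ha with ha | ha
      · rw [hdd' a (hqne a ha)]; exact h.hlb a ha
      · simp only [List.mem_singleton] at ha; subst ha; rw [hddnei]; omega
    have FL1old : ∀ u, (parent.insert nei (some n0)).contains u = true → u ∉ q ++ [nei] →
        u ≠ n0 → ∀ v, (u, v) ∈ pvPairs edges →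
        (parent.insert nei (some n0)).contains v = true ∧
          (depth.insert nei (d0 + 1)).getD v 0 ≤ (depth.insert nei (d0 + 1)).getD u 0 + 1 := by
      intro u hu huq hun0 v huv
      have hune : u ≠ nei := by
        intro rfl; exact huq (List.mem_append.2 (Or.inr (List.mem_singleton.2 rfl)))
      have hu' : parent.contains u = true := by
        rw [hcont'] at hu
        rcases Bool.or_eq_true_iff.1 hu with hu | hu
        · exact absurd (by simpa using hu) hune
        · exact hu
      have huq' : u ∉ q := fun hc => huq (List.mem_append.2 (Or.inl hc))
      obtain ⟨hv1, hv2⟩ := h.hL1old u hu' huq' hun0 v huv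
      have hvne : v ≠ nei := hkeysne v hv1
      refine ⟨by rw [hcont', hv1]; simp, ?_⟩
      rw [hdd' v hvne, hdd' u hune]; exact hv2
    have FL1n0 : ∀ v ∈ done ++ [nei], (parent.insert nei (some n0)).contains v = true ∧
        (depth.insert nei (d0 + 1)).getD v 0 ≤ d0 + 1 := by
      intro v hv
      rcases List.mem_append.1 hv with hv | hv
      · obtain ⟨hv1, hv2⟩ := h.hL1n0 v hv
        have hvne : v ≠ nei := hkeysne v hv1
        exact ⟨by rw [hcont', hv1]; simp, by rw [hdd' v hvne]; exact hv2⟩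
      · simp only [List.mem_singleton] at hv; subst hv
        exact ⟨by rw [hcont']; simp, by rw [hddnei]⟩
    have Fprocd0 : ∀ u, (parent.insert nei (some n0)).contains u = true → u ∉ q ++ [nei] →
        u ≠ n0 → (depth.insert nei (d0 + 1)).getD u 0 ≤ d0 := by
      intro u hu huq hun0
      have hune : u ≠ nei := by
        intro rfl; exact huq (List.mem_append.2 (Or.inr (List.mem_singleton.2 rfl)))
      have hu' : parent.contains u = true := by
        rw [hcont'] at hu
        rcases Bool.or_eq_true_iff.1 hu with hu | hu
        · exact absurd (by simpa using hu) hune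
        · exact hu
      have huq' : u ∉ q := fun hc => huq (List.mem_append.2 (Or.inl hc))
      rw [hdd' u hune]
      exact h.hprocd0 u hu' huq' hun0
    -- now the two md-branches
    simp only [pvStepA, hf, if_true, h.hn0d]
    by_cases hgt : d0 + 1 > md
    · rw [if_pos hgt]
      dsimp only
      exact { hnodup := Fnodup
              hqnodup := Fqnodup
              hqkeys := Fqkeys
              hdomeq := Fdomeq
              hone := Fone
              hroot := Froot
              hpar := Fpar
              hd1 := Fd1
              hchain := Fchain
              hreach := Freach
              hends := Fends
              hx := (by rw [hcont']; simp)
              hmdx := hddnei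
              hmdmax := (by
          intro v hv
          by_cases hvn : v = nei
          · subst hvn; rw [hddnei]
          · rw [hcont'] at hv
            rcases Bool.or_eq_true_iff.1 hv with hv | hv
            · exact absurd (by simpa using hv) hvn
            · rw [hdd' v hvn]
              have := h.hmdmax v hv
              omega)
              hn0in := Fn0in
              hn0d := Fn0d
              hn0q := Fn0q
              hmono := Fmono
              hub := Fub
              hlb := Flb
              hL1old := FL1old
              hL1n0 := FL1n0
              hprocd0 := Fprocd0 }
    · rw [if_neg hgt]
      dsimp only
      have hxne : x ≠ nei := hkeysne x h.hx
      exact { hnodup := Fnodup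
              hqnodup := Fqnodup
              hqkeys := Fqkeys
              hdomeq := Fdomeq
              hone := Fone
              hroot := Froot
              hpar := Fpar
              hd1 := Fd1
              hchain := Fchain
              hreach := Freach
              hends := Fends
              hx := (by rw [hcont', h.hx]; simp)
              hmdx := (by rw [hdd' x hxne]; exact h.hmdx)
              hmdmax := (by
          intro v hv
          by_cases hvn : v = nei
          · subst hvn; rw [hddnei]; omega
          · rw [hcont'] at hv
            rcases Bool.or_eq_true_iff.1 hv with hv | hv
            · exact absurd (by simpa using hv) hvn
            · rw [hdd' v hvn]; exact h.hmdmax v hv)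
              hn0in := Fn0in
              hn0d := Fn0d
              hn0q := Fn0q
              hmono := Fmono
              hub := Fub
              hlb := Flb
              hL1old := FL1old
              hL1n0 := FL1n0
              hprocd0 := Fprocd0 }
  · -- already discovered: state unchanged, only the done-list grows
    have hf' : parent.contains nei = true := by
      revert hf; cases parent.contains nei <;> simp
    simp only [pvStepA, hf', if_neg (by simp : ¬ (true = false))]
    refine { hnodup := h.hnodup
             hqnodup := h.hqnodup
             hqkeys := h.hqkeys
             hdomeq := h.hdomeq
             hone := h.hone
             hroot := h.hroot
             hpar := h.hpar
             hd1 := h.hd1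
             hchain := h.hchain
             hreach := h.hreach
             hends := h.hends
             hx := h.hx
             hmdx := h.hmdx
             hmdmax := h.hmdmax
             hn0in := h.hn0in
             hn0d := h.hn0d
             hn0q := h.hn0q
             hmono := h.hmono
             hub := h.hub
             hlb := h.hlb
             hL1old := h.hL1old
             hL1n0 := ?_
             hprocd0 := h.hprocd0 }
    intro v hv
    rcases List.mem_append.1 hv with hv | hv
    · exact h.hL1n0 v hv
    · simp only [List.mem_singleton] at hv; subst hv
      refine ⟨hf', ?_⟩
      by_cases hq : v ∈ q
      · exact h.hub v hq
      · by_cases hn : v = n0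
        · subst hn; rw [h.hn0d]; omega
        · have := h.hprocd0 v hf' hq hn; omega

structure pvInvA (edges : List (Int × Int)) (parent : PySem.Dict Int (Option Int))
    (depth : PySem.Dict Int Int) (q : List Int) (md x : Int) : Prop where
  hnodup : parent.keys.Nodup
  hqnodup : q.Nodup
  hqkeys : ∀ v ∈ q, parent.contains v = true
  hdomeq : ∀ v, depth.contains v = parent.contains v
  hone : parent.get? 1 = some none
  hroot : ∀ v w, parent.get? v = some w → w = none → v = 1
  hpar : ∀ v u, parent.get? v = some (some u) →
    (u, v) ∈ pvPairs edges ∧ parent.contains u = true ∧ depth.getD v 0 = depth.getD u 0 + 1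
  hd1 : depth.getD 1 0 = 0
  hchain : ∀ v, parent.contains v = true →
    ∃ k : Nat, depth.getD v 0 = (k : Int) ∧ pvChainOk parent v k ∧ k < parent.size
  hreach : ∀ v, parent.contains v = true → pvReach edges v
  hends : ∀ v, parent.contains v = true → v = 1 ∨ v ∈ (pvPairs edges).map Prod.fst
  hx : parent.contains x = true
  hmdx : depth.getD x 0 = md
  hmdmax : ∀ v, parent.contains v = true → depth.getD v 0 ≤ md
  hmono : q.Pairwise (fun a b => depth.getD a 0 ≤ depth.getD b 0)
  hband : ∀ h t, q = h :: t → ∀ a ∈ q, depth.getD a 0 ≤ depth.getD h 0 + 1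
  hL1 : ∀ u, parent.contains u = true → u ∉ q → ∀ v, (u, v) ∈ pvPairs edges →
    parent.contains v = true ∧ depth.getD v 0 ≤ depth.getD u 0 + 1
  hL3 : ∀ u, parent.contains u = true → u ∉ q → ∀ m ∈ q, depth.getD u 0 ≤ depth.getD m 0

lemma pvInvA_to_mid (edges : List (Int × Int)) (n0 : Int) (rest : List Int)
    (parent : PySem.Dict Int (Option Int)) (depth : PySem.Dict Int Int) (md x : Int)
    (h : pvInvA edges parent depth (n0 :: rest) md x) :
    pvMidA edges n0 (depth.getD n0 0) [] parent depth rest md x := by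
  have hn0in : parent.contains n0 = true := h.hqkeys n0 (List.mem_cons_self ..)
  have hmc := List.pairwise_cons.1 h.hmono
  exact { hnodup := h.hnodup
          hqnodup := (List.nodup_cons.1 h.hqnodup).2
          hqkeys := fun v hv => h.hqkeys v (List.mem_cons_of_mem _ hv)
          hdomeq := h.hdomeq
          hone := h.hone
          hroot := h.hroot
          hpar := h.hpar
          hd1 := h.hd1
          hchain := h.hchain
          hreach := h.hreach
          hends := h.hends
          hx := h.hx
          hmdx := h.hmdx
          hmdmax := h.hmdmax
          hn0in := hn0in
          hn0d := rfl
          hn0q := (List.nodup_cons.1 h.hqnodup).1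
          hmono := hmc.2
          hub := fun a ha => h.hband n0 rest rfl a (List.mem_cons_of_mem _ ha)
          hlb := fun a ha => hmc.1 a ha
          hL1old := fun u hu huq hun0 v huv =>
            h.hL1 u hu (by
              intro hc
              rcases List.mem_cons.1 hc with hc | hc
              · exact hun0 hc
              · exact huq hc) v huv
          hL1n0 := fun v hv => absurd hv (List.not_mem_nil)
          hprocd0 := fun u hu huq hun0 => by
            have : u ∉ n0 :: rest := by
              intro hc
              rcases List.mem_cons.1 hc with hc | hc
              · exact hun0 hc
              · exact huq hc
            exact h.hL3 u hu this n0 (List.mem_cons_self ..) }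

lemma pvMidA_close (edges : List (Int × Int)) (n0 d0 : Int) (done : List Int)
    (parent : PySem.Dict Int (Option Int)) (depth : PySem.Dict Int Int)
    (q : List Int) (md x : Int)
    (hcov : ∀ v, (n0, v) ∈ pvPairs edges → v ∈ done)
    (h : pvMidA edges n0 d0 done parent depth q md x) :
    pvInvA edges parent depth q md x :=
  { hnodup := h.hnodup
    hqnodup := h.hqnodup
    hqkeys := h.hqkeys
    hdomeq := h.hdomeq
    hone := h.hone
    hroot := h.hroot
    hpar := h.hpar
    hd1 := h.hd1
    hchain := h.hchain
    hreach := h.hreach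
    hends := h.hends
    hx := h.hx
    hmdx := h.hmdx
    hmdmax := h.hmdmax
    hmono := h.hmono
    hband := by
      intro hd t hq a ha
      have h1 := h.hub a ha
      have h2 := h.hlb hd (by rw [hq]; exact List.mem_cons_self ..)
      omega
    hL1 := by
      intro u hu huq v huv
      by_cases hun : u = n0
      · subst hun
        obtain ⟨hv1, hv2⟩ := h.hL1n0 v (hcov v huv)
        rw [h.hn0d]
        exact ⟨hv1, hv2⟩
      · exact h.hL1old u hu huq hun v huv
    hL3 := by
      intro u hu huq m hm
      by_cases hun : u = n0
      · subst hun
        rw [h.hn0d]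
        exact h.hlb m hm
      · have h1 := h.hprocd0 u hu huq hun
        have h2 := h.hlb m hm
        omega }

lemma pvStepA_count (n0 nei : Int)
    (st : PySem.Dict Int (Option Int) × PySem.Dict Int Int × List Int × Int × Int) :
    (pvStepA n0 st nei).1.size + st.2.2.1.length
      = st.1.size + (pvStepA n0 st nei).2.2.1.length ∧
    st.2.2.1.length ≤ (pvStepA n0 st nei).2.2.1.length := by
  by_cases hf : st.1.contains nei = false
  · simp only [pvStepA, hf, if_true]
    have hsz : (st.1.insert nei (some n0)).size = st.1.size + 1 := by
      rw [PySem.Dict.size_insert, hf]; simp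
    by_cases hgt : st.2.1.getD n0 0 + 1 > st.2.2.2.1
    · rw [if_pos hgt]; dsimp only; rw [hsz]; simp; omega
    · rw [if_neg hgt]; dsimp only; rw [hsz]; simp; omega
  · have hf' : st.1.contains nei = true := by revert hf; cases st.1.contains nei <;> simp
    simp only [pvStepA, hf', if_neg (by simp : ¬ (true = false))]
    exact ⟨by trivial, by trivial⟩

lemma pvFoldA_count (n0 : Int) : ∀ (ns : List Int)
    (st : PySem.Dict Int (Option Int) × PySem.Dict Int Int × List Int × Int × Int),
    (ns.foldl (pvStepA n0) st).1.size + st.2.2.1.length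
      = st.1.size + (ns.foldl (pvStepA n0) st).2.2.1.length ∧
    st.2.2.1.length ≤ (ns.foldl (pvStepA n0) st).2.2.1.length := by
  intro ns
  induction ns with
  | nil => intro st; simp
  | cons b bs ih =>
    intro st
    rw [List.foldl_cons]
    obtain ⟨h1, h2⟩ := pvStepA_count n0 b st
    obtain ⟨h3, h4⟩ := ih (pvStepA n0 st b)
    omega

lemma pvFoldA_mid (edges : List (Int × Int)) (n0 d0 : Int) :
    ∀ (ns done : List Int)
      (st : PySem.Dict Int (Option Int) × PySem.Dict Int Int × List Int × Int × Int),
    (∀ b ∈ ns, (n0, b) ∈ pvPairs edges) →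
    pvMidA edges n0 d0 done st.1 st.2.1 st.2.2.1 st.2.2.2.1 st.2.2.2.2 →
    pvMidA edges n0 d0 (done ++ ns) ((ns.foldl (pvStepA n0) st)).1 ((ns.foldl (pvStepA n0) st)).2.1
      ((ns.foldl (pvStepA n0) st)).2.2.1 ((ns.foldl (pvStepA n0) st)).2.2.2.1
      ((ns.foldl (pvStepA n0) st)).2.2.2.2 := by
  intro ns
  induction ns with
  | nil => intro done st _ h; simpa using h
  | cons b bs ih =>
    intro done st hmem h
    have := ih (done ++ [b]) _ (fun c hc => hmem c (List.mem_cons_of_mem _ hc))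
      (pvStepA_mid edges n0 d0 done b st (hmem b (List.mem_cons_self ..)) h)
    simpa using this

lemma pvBFSA_run (edges : List (Int × Int)) (tree : PySem.Dict Int (List Int))
    (htree : ∀ a b, b ∈ tree.getD a [] ↔ (a, b) ∈ pvPairs edges) :
    ∀ (fuel : Nat) (q : List Int) (parent : PySem.Dict Int (Option Int))
      (depth : PySem.Dict Int Int) (md x : Int),
    pvInvA edges parent depth q md x →
    q.length + (2 * edges.length + 1 - parent.size) < fuel →
    pvInvA edges (pvBFSA fuel tree q parent depth md x).1 (pvBFSA fuel tree q parent depth md x).2.1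
      [] (pvBFSA fuel tree q parent depth md x).2.2.1 (pvBFSA fuel tree q parent depth md x).2.2.2 := by
  intro fuel
  induction fuel with
  | zero => intro q parent depth md x _ hm; omega
  | succ f ih =>
    intro q parent depth md x hinv hm
    cases q with
    | nil => simpa only [pvBFSA] using hinv
    | cons n0 rest =>
      simp only [pvBFSA]
      have hmid0 := pvInvA_to_mid edges n0 rest parent depth md x hinv
      have hns : ∀ b ∈ tree.getD n0 [], (n0, b) ∈ pvPairs edges :=
        fun b hb => (htree n0 b).1 hb
      have hmid := pvFoldA_mid edges n0 (depth.getD n0 0) (tree.getD n0 []) []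
        (parent, depth, rest, md, x) hns hmid0
      have hcov : ∀ v, (n0, v) ∈ pvPairs edges → v ∈ [] ++ tree.getD n0 [] := by
        intro v hv; simpa using (htree n0 v).2 hv
      have hinv' := pvMidA_close edges n0 (depth.getD n0 0) _ _ _ _ _ _ hcov hmid
      obtain ⟨hcnt, hle⟩ := pvFoldA_count n0 (tree.getD n0 []) (parent, depth, rest, md, x)
      have hsz : ((tree.getD n0 []).foldl (pvStepA n0) (parent, depth, rest, md, x)).1.size
          ≤ 2 * edges.length + 1 := pvSizeBound _ hinv'.hnodup hinv'.hends
      exact ih _ _ _ _ _ hinv' (by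
        simp only [List.length_cons] at hm
        dsimp only at hcnt hle
        omega)

lemma pvInvA_init (edges : List (Int × Int)) :
    pvInvA edges (PySem.Dict.empty.insert 1 none) (PySem.Dict.empty.insert 1 0) [1] 0 1 := by
  have hcv : ∀ v : Int, (PySem.Dict.empty.insert (1:Int) (none : Option Int)).contains v = true ↔ v = 1 := by
    intro v
    rw [PySem.Dict.contains_insert]
    simp [PySem.Dict.contains_empty]
  have hdv : ∀ v : Int, ((PySem.Dict.empty : PySem.Dict Int Int).insert 1 0).contains v = true ↔ v = 1 := by
    intro v
    rw [PySem.Dict.contains_insert]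
    simp [PySem.Dict.contains_empty]
  have hget1 : (PySem.Dict.empty.insert (1:Int) (none : Option Int)).get? 1 = some none :=
    PySem.Dict.get?_insert_self ..
  have hgetne : ∀ v : Int, v ≠ 1 →
      (PySem.Dict.empty.insert (1:Int) (none : Option Int)).get? v = none := by
    intro v hv
    rw [PySem.Dict.get?_insert_of_ne _ _ hv, PySem.Dict.get?_empty]
  have hsz : (PySem.Dict.empty.insert (1:Int) (none : Option Int)).size = 1 := by
    rw [PySem.Dict.size_insert, PySem.Dict.contains_empty]
    simp [PySem.Dict.size_empty]
  have hd1 : ((PySem.Dict.empty : PySem.Dict Int Int).insert 1 0).getD 1 0 = 0 :=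
    PySem.Dict.getD_insert_self ..
  refine { hnodup := PySem.Dict.nodup_keys_insert _ _ _ PySem.Dict.nodup_keys_empty
           hqnodup := List.nodup_singleton _
           hqkeys := ?_
           hdomeq := ?_
           hone := hget1
           hroot := ?_
           hpar := ?_
           hd1 := hd1
           hchain := ?_
           hreach := ?_
           hends := ?_
           hx := (hcv 1).2 rfl
           hmdx := hd1
           hmdmax := ?_
           hmono := List.pairwise_singleton ..
           hband := ?_
           hL1 := ?_
           hL3 := ?_ }
  · intro v hv
    rw [List.mem_singleton.1 hv]
    exact (hcv 1).2 rfl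
  · intro v
    rw [PySem.Dict.contains_insert, PySem.Dict.contains_insert]
    simp [PySem.Dict.contains_empty]
  · intro v w hv _
    by_cases h1 : v = 1
    · exact h1
    · rw [hgetne v h1] at hv; cases hv
  · intro v u hv
    by_cases h1 : v = 1
    · subst h1; rw [hget1] at hv; cases hv
    · rw [hgetne v h1] at hv; cases hv
  · intro v hv
    have h1 := (hcv v).1 hv
    subst h1
    exact ⟨0, hd1, hget1, by rw [hsz]; omega⟩
  · intro v hv
    rw [(hcv v).1 hv]; exact pvReach.root
  · intro v hv
    exact Or.inl ((hcv v).1 hv)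
  · intro v hv
    rw [(hcv v).1 hv, hd1]
  · intro hd t hq a ha
    rw [List.mem_singleton.1 ha]
    rcases List.cons_eq_cons.1 hq.symm with ⟨rfl, _⟩
    omega
  · intro u hu huq
    exact absurd (List.mem_singleton.2 ((hcv u).1 hu)) huq
  · intro u hu huq
    exact absurd (List.mem_singleton.2 ((hcv u).1 hu)) huq

-- ---------- glue: both final states assign the same distances ----------


-- ---------- B side ----------

structure pvInvB (edges : List (Int × Int)) (d : PySem.Dict Int Int) : Prop where
  hnodup : d.keys.Nodup
  hone : d.get? 1 = some 0
  hval : ∀ v x, d.get? v = some x → 0 ≤ x ∧ x ≤ (d.size : Int) - 1 ∧ pvReach edges v ∧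
    (v = 1 ∨ ∃ u y, (u, v) ∈ pvPairs edges ∧ d.get? u = some y ∧ y + 1 ≤ x)
  hends : ∀ v, d.contains v = true → v = 1 ∨ v ∈ (pvPairs edges).map Prod.fst

def pvFixB (edges : List (Int × Int)) (d : PySem.Dict Int Int) : Prop :=
  ∀ p ∈ pvPairs edges, ∀ da, d.get? p.1 = some da → ∃ db, d.get? p.2 = some db ∧ db ≤ da + 1

def pvPhi (L : Nat) (d : PySem.Dict Int Int) : Nat :=
  (d.keys.map (fun k => (d.getD k 0).toNat)).sum + (2 * L + 1 - d.size) * (2 * L + 2)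

-- sum helpers
lemma pvSum_insert_fresh (d : PySem.Dict Int Int) (b x : Int) (hb : d.contains b = false) :
    (((d.insert b x).keys).map (fun k => ((d.insert b x).getD k 0).toNat)).sum
      = ((d.keys).map (fun k => (d.getD k 0).toNat)).sum + x.toNat := by
  rw [PySem.Dict.keys_insert_of_not_contains _ _ hb]
  rw [List.map_append, List.sum_append]
  have h1 : (d.keys.map (fun k => ((d.insert b x).getD k 0).toNat))
      = d.keys.map (fun k => (d.getD k 0).toNat) := by
    apply List.map_congr_left
    intro k hk
    have : k ≠ b := by
      intro rfl
      rw [(PySem.Dict.contains_iff_mem_keys _ _).2 hk] at hb; cases hb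
    rw [PySem.Dict.getD_insert_of_ne _ _ _ this]
  rw [h1]
  simp [PySem.Dict.getD_insert_self]

lemma pvSum_insert_over (d : PySem.Dict Int Int) (b x : Int) (hb : d.contains b = true)
    (hx : x.toNat < (d.getD b 0).toNat) :
    (((d.insert b x).keys).map (fun k => ((d.insert b x).getD k 0).toNat)).sum
      < ((d.keys).map (fun k => (d.getD k 0).toNat)).sum := by
  rw [PySem.Dict.keys_insert_of_contains _ _ hb]
  apply List.sum_lt_sum
  · intro k _
    by_cases hkb : k = b
    · subst hkb; rw [PySem.Dict.getD_insert_self]; omega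
    · rw [PySem.Dict.getD_insert_of_ne _ _ _ hkb]
  · exact ⟨b, (PySem.Dict.contains_iff_mem_keys _ _).1 hb,
      by rw [PySem.Dict.getD_insert_self]; omega⟩

lemma pvRelaxB_inv (edges : List (Int × Int)) (L : Nat) (hL : L = edges.length)
    (st : PySem.Dict Int Int × Bool) (a b : Int)
    (hab : (a, b) ∈ pvPairs edges) (h : pvInvB edges st.1) :
    pvInvB edges (pvRelaxB st a b).1 ∧
      (pvRelaxB st a b = st ∨ ((pvRelaxB st a b).2 = true ∧ pvPhi L (pvRelaxB st a b).1 < pvPhi L st.1)) := by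
  obtain ⟨d, fl⟩ := st
  dsimp only at h ⊢
  rcases h1 : d.get? a with _ | da
  · simp only [pvRelaxB, h1]
    exact ⟨h, Or.inl (by trivial)⟩
  · obtain ⟨hda0, hdas, hra, hwa⟩ := h.hval a da h1
    -- facts independent of branch
    have hchange : ∀ (hbranch : d.get? b = none ∨ ∃ db, d.get? b = some db ∧ db > da + 1),
        pvInvB edges (d.insert b (da+1)) ∧ pvPhi L (d.insert b (da+1)) < pvPhi L d := by
      intro hbranch
      have hanb : a ≠ b := by
        rcases hbranch with hb | ⟨db, hb, hgt⟩
        · intro rfl; rw [h1] at hb; cases hb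
        · intro rfl; rw [h1] at hb; cases hb; omega
      have hbn1 : b ≠ 1 := by
        rcases hbranch with hb | ⟨db, hb, hgt⟩
        · intro rfl; rw [h.hone] at hb; cases hb
        · intro rfl; rw [h.hone] at hb; cases hb; omega
      have hnodup' : (d.insert b (da+1)).keys.Nodup := PySem.Dict.nodup_keys_insert _ _ _ h.hnodup
      have hsizele : (d.size : Int) ≤ ((d.insert b (da+1)).size : Int) := by
        rw [PySem.Dict.size_insert]; split_ifs <;> push_cast <;> omega
      have hends' : ∀ v, (d.insert b (da+1)).contains v = true →
          v = 1 ∨ v ∈ (pvPairs edges).map Prod.fst := by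
        intro v hv
        rw [PySem.Dict.contains_insert] at hv
        rcases Bool.or_eq_true_iff.1 hv with hv | hv
        · have : v = b := by simpa using hv
          subst this; exact Or.inr (pvPairs_fst_mem (pvPairs_mem_symm hab))
        · exact h.hends v hv
      have hvalb : da + 1 ≤ ((d.insert b (da+1)).size : Int) - 1 := by
        rw [PySem.Dict.size_insert]
        rcases hbranch with hb | ⟨db, hb, hgt⟩
        · have hnc : d.contains b = false := by
            rw [PySem.Dict.contains_eq_isSome_get?, hb]; rfl
          rw [hnc]; push_cast; omega
        · have hc : d.contains b = true := by
            rw [PySem.Dict.contains_eq_isSome_get?, hb]; rfl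
          have := (h.hval b db hb).2.1
          rw [hc]; push_cast; omega
      refine ⟨⟨hnodup', ?_, ?_, hends'⟩, ?_⟩
      · rw [PySem.Dict.get?_insert_of_ne _ _ (Ne.symm hbn1)]; exact h.hone
      · intro v x hv
        by_cases hvb : v = b
        · subst hvb
          rw [PySem.Dict.get?_insert_self] at hv
          cases hv
          refine ⟨by omega, hvalb, pvReach.step a _ hra hab, Or.inr ⟨a, da, hab, ?_, le_refl _⟩⟩
          rw [PySem.Dict.get?_insert_of_ne _ _ hanb]; exact h1
        · rw [PySem.Dict.get?_insert_of_ne _ _ hvb] at hv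
          obtain ⟨h0, hs, hr, hw⟩ := h.hval v x hv
          refine ⟨h0, by omega, hr, ?_⟩
          rcases hw with rfl | ⟨u, y, hup, huy, hle⟩
          · exact Or.inl rfl
          · by_cases hub : u = b
            · subst hub
              rcases hbranch with hb | ⟨db, hb, hgt⟩
              · rw [huy] at hb; cases hb
              · rw [huy] at hb; cases hb
                exact Or.inr ⟨_, da + 1, hup, PySem.Dict.get?_insert_self .., by omega⟩
            · exact Or.inr ⟨u, y, hup, by rw [PySem.Dict.get?_insert_of_ne _ _ hub]; exact huy, hle⟩
      · -- potential strictly decreases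
        have hsz' : (d.insert b (da+1)).size ≤ 2 * L + 1 := by
          rw [hL]; exact pvSizeBound _ hnodup' hends'
        rcases hbranch with hb | ⟨db, hb, hgt⟩
        · have hnc : d.contains b = false := by
            rw [PySem.Dict.contains_eq_isSome_get?, hb]; rfl
          have hsum := pvSum_insert_fresh d b (da+1) hnc
          have hsz2 : (d.insert b (da+1)).size = d.size + 1 := by
            rw [PySem.Dict.size_insert, hnc]; simp
          have hx : (da+1).toNat ≤ 2 * L := by
            have : da + 1 ≤ ((d.insert b (da+1)).size : Int) - 1 := hvalb
            omega
          unfold pvPhi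
          rw [hsum, hsz2]
          have hszle : d.size + 1 ≤ 2 * L + 1 := by omega
          have e1 : 2 * L + 1 - d.size = (2 * L + 1 - (d.size + 1)) + 1 := by omega
          rw [e1]
          ring_nf
          omega
        · have hc : d.contains b = true := by
            rw [PySem.Dict.contains_eq_isSome_get?, hb]; rfl
          have hgd : d.getD b 0 = db := by
            rw [PySem.Dict.getD_eq_get?_getD, hb]; rfl
          have hsum := pvSum_insert_over d b (da+1) hc (by rw [hgd]; omega)
          have hsz2 : (d.insert b (da+1)).size = d.size := by
            rw [PySem.Dict.size_insert, hc]; simp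
          unfold pvPhi
          rw [hsz2]
          omega
    rcases h2 : d.get? b with _ | db
    · simp only [pvRelaxB, h1, h2]
      obtain ⟨hi, hp⟩ := hchange (Or.inl h2)
      exact ⟨hi, Or.inr ⟨by trivial, hp⟩⟩
    · by_cases hgt : db > da + 1
      · simp only [pvRelaxB, h1, h2, if_pos hgt]
        obtain ⟨hi, hp⟩ := hchange (Or.inr ⟨db, h2, hgt⟩)
        exact ⟨hi, Or.inr ⟨by trivial, hp⟩⟩
      · simp only [pvRelaxB, h1, h2, if_neg hgt]
        exact ⟨h, Or.inl (by trivial)⟩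

-- one edge-body of the sweep
lemma pvBodyB_inv (edges : List (Int × Int)) (L : Nat) (hL : L = edges.length)
    (st : PySem.Dict Int Int × Bool) (e : Int × Int)
    (he : e ∈ edges) (h : pvInvB edges st.1) :
    pvInvB edges (pvRelaxB (pvRelaxB st e.1 e.2) e.2 e.1).1 ∧
      (pvRelaxB (pvRelaxB st e.1 e.2) e.2 e.1 = st ∨
        ((pvRelaxB (pvRelaxB st e.1 e.2) e.2 e.1).2 = true ∧
          pvPhi L (pvRelaxB (pvRelaxB st e.1 e.2) e.2 e.1).1 < pvPhi L st.1)) := by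
  have h12 : (e.1, e.2) ∈ pvPairs edges := by
    simp only [pvPairs, List.mem_flatMap]; exact ⟨e, he, by simp⟩
  have h21 : (e.2, e.1) ∈ pvPairs edges := pvPairs_mem_symm h12
  obtain ⟨hi1, hc1⟩ := pvRelaxB_inv edges L hL st e.1 e.2 h12 h
  obtain ⟨hi2, hc2⟩ := pvRelaxB_inv edges L hL (pvRelaxB st e.1 e.2) e.2 e.1 h21 hi1
  refine ⟨hi2, ?_⟩
  rcases hc1 with hc1 | ⟨hf1, hp1⟩
  · rw [hc1] at hc2 ⊢; exact hc2
  · rcases hc2 with hc2 | ⟨hf2, hp2⟩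
    · rw [hc2]; exact Or.inr ⟨hf1, hp1⟩
    · exact Or.inr ⟨hf2, lt_trans hp2 hp1⟩

lemma pvFoldB_inv (edges : List (Int × Int)) (L : Nat) (hL : L = edges.length) :
    ∀ (l : List (Int × Int)) (st : PySem.Dict Int Int × Bool),
    (∀ e ∈ l, e ∈ edges) → pvInvB edges st.1 →
    pvInvB edges ((l.foldl (fun st e => pvRelaxB (pvRelaxB st e.1 e.2) e.2 e.1) st)).1 ∧
      ((l.foldl (fun st e => pvRelaxB (pvRelaxB st e.1 e.2) e.2 e.1) st) = st ∨
        ((l.foldl (fun st e => pvRelaxB (pvRelaxB st e.1 e.2) e.2 e.1) st).2 = true ∧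
          pvPhi L (l.foldl (fun st e => pvRelaxB (pvRelaxB st e.1 e.2) e.2 e.1) st).1 < pvPhi L st.1)) := by
  intro l
  induction l with
  | nil => intro st _ h; exact ⟨h, Or.inl rfl⟩
  | cons e t ih =>
    intro st hmem h
    obtain ⟨hi1, hc1⟩ := pvBodyB_inv edges L hL st e (hmem e (List.mem_cons_self ..)) h
    obtain ⟨hi2, hc2⟩ := ih _ (fun x hx => hmem x (List.mem_cons_of_mem _ hx)) hi1
    rw [List.foldl_cons]
    refine ⟨hi2, ?_⟩
    rcases hc1 with hc1 | ⟨hf1, hp1⟩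
    · rw [hc1] at hc2 ⊢; exact hc2
    · rcases hc2 with hc2 | ⟨hf2, hp2⟩
      · rw [hc2]; exact Or.inr ⟨hf1, hp1⟩
      · exact Or.inr ⟨hf2, lt_trans hp2 hp1⟩

lemma pvSweepB_inv (edges : List (Int × Int)) (L : Nat) (hL : L = edges.length)
    (sweep : List (Int × Int)) (hsw : ∀ e ∈ sweep, e ∈ edges)
    (d : PySem.Dict Int Int) (h : pvInvB edges d) :
    pvInvB edges (pvSweepB sweep d).1 ∧
      ((pvSweepB sweep d).2 = false → (pvSweepB sweep d).1 = d) ∧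
      ((pvSweepB sweep d).2 = true → pvPhi L (pvSweepB sweep d).1 < pvPhi L d) := by
  obtain ⟨hi, hc⟩ := pvFoldB_inv edges L hL sweep (d, false) hsw h
  refine ⟨hi, ?_, ?_⟩
  · intro hf
    rcases hc with hc | ⟨hf2, _⟩
    · rw [pvSweepB]; rw [show (sweep.foldl (fun st e => pvRelaxB (pvRelaxB st e.1 e.2) e.2 e.1) (d, false)) = (d, false) from hc]
    · rw [pvSweepB] at hf; rw [hf] at hf2; cases hf2
  · intro hf
    rcases hc with hc | ⟨_, hp⟩
    · rw [pvSweepB] at hf; rw [hc] at hf; cases hf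
    · exact hp

-- per-step no-change extraction
def pvNoch (d : PySem.Dict Int Int) (a b : Int) : Prop :=
  ∀ da, d.get? a = some da → ∃ db, d.get? b = some db ∧ db ≤ da + 1

lemma pvRelaxB_nochange (st : PySem.Dict Int Int × Bool) (a b : Int)
    (hf : (pvRelaxB st a b).2 = false) : pvRelaxB st a b = st ∧ pvNoch st.1 a b := by
  rcases h1 : st.1.get? a with _ | da
  · simp only [pvRelaxB, h1]
    exact ⟨by trivial, fun da hda => by rw [h1] at hda; cases hda⟩
  · rcases h2 : st.1.get? b with _ | db
    · simp only [pvRelaxB, h1, h2] at hf; cases hf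
    · by_cases hgt : db > da + 1
      · simp only [pvRelaxB, h1, h2, if_pos hgt] at hf; cases hf
      · simp only [pvRelaxB, h1, h2, if_neg hgt]
        refine ⟨by trivial, fun da' hda => ?_⟩
        rw [h1] at hda; cases hda
        exact ⟨db, h2, by omega⟩

lemma pvRelaxB_flag_mono (st : PySem.Dict Int Int × Bool) (a b : Int)
    (hf : st.2 = true) : (pvRelaxB st a b).2 = true := by
  rcases h1 : st.1.get? a with _ | da
  · simp only [pvRelaxB, h1]; exact hf
  · rcases h2 : st.1.get? b with _ | db
    · simp only [pvRelaxB, h1, h2]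
    · by_cases hgt : db > da + 1
      · simp only [pvRelaxB, h1, h2, if_pos hgt]
      · simp only [pvRelaxB, h1, h2, if_neg hgt]; exact hf

lemma pvFoldB_flag_mono : ∀ (l : List (Int × Int)) (st : PySem.Dict Int Int × Bool),
    st.2 = true → ((l.foldl (fun st e => pvRelaxB (pvRelaxB st e.1 e.2) e.2 e.1) st)).2 = true := by
  intro l
  induction l with
  | nil => intro st h; exact h
  | cons e t ih =>
    intro st h
    exact ih _ (pvRelaxB_flag_mono _ _ _ (pvRelaxB_flag_mono _ _ _ h))

lemma pvFoldB_nochange : ∀ (l : List (Int × Int)) (st : PySem.Dict Int Int × Bool),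
    ((l.foldl (fun st e => pvRelaxB (pvRelaxB st e.1 e.2) e.2 e.1) st)).2 = false →
    ∀ e ∈ l, pvNoch st.1 e.1 e.2 ∧ pvNoch st.1 e.2 e.1 := by
  intro l
  induction l with
  | nil => intro st _ e he; cases he
  | cons e t ih =>
    intro st hf e' he'
    rw [List.foldl_cons] at hf
    have hstep : (pvRelaxB (pvRelaxB st e.1 e.2) e.2 e.1).2 = false := by
      by_cases hx : (pvRelaxB (pvRelaxB st e.1 e.2) e.2 e.1).2 = true
      · rw [pvFoldB_flag_mono t _ hx] at hf; cases hf
      · simpa using hx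
    obtain ⟨heq2, hn2⟩ := pvRelaxB_nochange _ _ _ hstep
    have hstep1 : (pvRelaxB st e.1 e.2).2 = false := by
      by_cases hx : (pvRelaxB st e.1 e.2).2 = true
      · rw [pvRelaxB_flag_mono _ _ _ hx] at hstep; cases hstep
      · simpa using hx
    obtain ⟨heq1, hn1⟩ := pvRelaxB_nochange _ _ _ hstep1
    rcases List.mem_cons.mp he' with rfl | he2
    · rw [heq1] at hn2; exact ⟨hn1, hn2⟩
    · rw [heq2, heq1] at hf
      exact ih st hf e' he2

lemma pvSweepB_fix (edges : List (Int × Int)) (sweep : List (Int × Int))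
    (hsw : ∀ e ∈ edges, e ∈ sweep) (d : PySem.Dict Int Int)
    (hnc : (pvSweepB sweep d).2 = false) : pvFixB edges d := by
  have hall := pvFoldB_nochange sweep (d, false) hnc
  intro p hp da hda
  simp only [pvPairs, List.mem_flatMap, List.mem_cons, List.not_mem_nil, or_false] at hp
  obtain ⟨e, he, hpe⟩ := hp
  obtain ⟨hn1, hn2⟩ := hall e (hsw e he)
  rcases hpe with rfl | rfl
  · exact hn1 da hda
  · exact hn2 da hda

lemma pvLoopB_run (edges : List (Int × Int)) :
    ∀ (fuel : Nat) (fwd : Bool) (d : PySem.Dict Int Int),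
    pvInvB edges d → pvPhi edges.length d < fuel →
    pvInvB edges (pvLoopB fuel edges fwd d) ∧ pvFixB edges (pvLoopB fuel edges fwd d) := by
  intro fuel
  induction fuel with
  | zero => intro fwd d _ hlt; omega
  | succ f ih =>
    intro fwd d h hlt
    have hsw : ∀ e ∈ (if fwd then edges else edges.reverse), e ∈ edges := by
      intro e he; split at he
      · exact he
      · exact (List.mem_reverse).1 he
    have hsw2 : ∀ e ∈ edges, e ∈ (if fwd then edges else edges.reverse) := by
      intro e he; split
      · exact he
      · exact (List.mem_reverse).2 he
    obtain ⟨hi, hnc, hch⟩ := pvSweepB_inv edges edges.length rfl _ hsw d h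
    rw [pvLoopB]
    rcases hb : (pvSweepB (if fwd then edges else edges.reverse) d).2 with _ | _
    · simp only [if_neg (by simp : ¬ (false = true))]
      rw [hnc hb]
      exact ⟨h, pvSweepB_fix edges _ hsw2 d hb⟩
    · simp only [if_true]
      exact ih (!fwd) _ hi (by have := hch hb; omega)
lemma pvGetOfContains {κ ν : Type} [BEq κ] (d : PySem.Dict κ ν) (k : κ)
    (h : d.contains k = true) : ∃ v, d.get? k = some v := by
  rw [PySem.Dict.contains_eq_isSome_get?] at h
  exact Option.isSome_iff_exists.1 h

lemma pvGlue (edges : List (Int × Int))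
    (parent : PySem.Dict Int (Option Int)) (depth : PySem.Dict Int Int) (md x : Int)
    (hA : pvInvA edges parent depth [] md x)
    (d : PySem.Dict Int Int) (hB : pvInvB edges d) (hF : pvFixB edges d) :
    (PySem.List.max? d.values (fun y => y)).getD 0 = md := by
  have hcontA : ∀ v, pvReach edges v → parent.contains v = true := by
    intro v hv
    induction hv with
    | root => rw [PySem.Dict.contains_eq_isSome_get?, hA.hone]; rfl
    | step u v hu huv ih => exact (hA.hL1 u ih (List.not_mem_nil) v huv).1
  have hcontB : ∀ v, pvReach edges v → d.contains v = true := by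
    intro v hv
    induction hv with
    | root => rw [PySem.Dict.contains_eq_isSome_get?, hB.hone]; rfl
    | step u v hu huv ih =>
      obtain ⟨y, hy⟩ := pvGetOfContains d u ih
      obtain ⟨db, hdb, _⟩ := hF (u, v) huv y hy
      rw [PySem.Dict.contains_eq_isSome_get?, hdb]; rfl
  have hdomAB : ∀ v, parent.contains v = true ↔ d.contains v = true := by
    intro v
    constructor
    · intro h; exact hcontB v (hA.hreach v h)
    · intro h
      obtain ⟨y, hy⟩ := pvGetOfContains d v h
      exact hcontA v (hB.hval v y hy).2.2.1
  have hleAB : ∀ k : Nat, ∀ v (xv : Int), d.get? v = some xv → xv = (k : Int) →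
      parent.contains v = true ∧ depth.getD v 0 ≤ (k : Int) := by
    intro k
    induction k using Nat.strong_induction_on with
    | _ k ihk =>
      intro v xv hv hxk
      obtain ⟨h0, hs, hr, hw⟩ := hB.hval v xv hv
      rcases hw with rfl | ⟨u, y, hp, hy, hle⟩
      · refine ⟨hcontA 1 pvReach.root, ?_⟩
        rw [hA.hd1]; positivity
      · have hy0 : 0 ≤ y := (hB.hval u y hy).1
        have hym : y = ((y.toNat : Nat) : Int) := (Int.toNat_of_nonneg hy0).symm
        have hmk : y.toNat < k := by omega
        obtain ⟨hcu, hdu⟩ := ihk y.toNat hmk u y hy hym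
        obtain ⟨hcv, hdvle⟩ := hA.hL1 u hcu (List.not_mem_nil) v hp
        exact ⟨hcv, by omega⟩
  have hleBA : ∀ k : Nat, ∀ v, parent.contains v = true → depth.getD v 0 = (k : Int) →
      ∃ xv, d.get? v = some xv ∧ xv ≤ (k : Int) := by
    intro k
    induction k using Nat.strong_induction_on with
    | _ k ihk =>
      intro v hcv hdk
      obtain ⟨w, hw⟩ := pvGetOfContains parent v hcv
      cases w with
      | none =>
        have h1 : v = 1 := hA.hroot v none hw rfl
        subst h1
        exact ⟨0, hB.hone, by positivity⟩
      | some u =>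
        obtain ⟨hp, hcu, hdvu⟩ := hA.hpar v u hw
        obtain ⟨m, hdum, _, _⟩ := hA.hchain u hcu
        have hkm : k = m + 1 := by omega
        obtain ⟨xu, hxu, hxule⟩ := ihk m (by omega) u hcu hdum
        obtain ⟨xv, hxv, hxvle⟩ := hF (u, v) hp xu hxu
        exact ⟨xv, hxv, by omega⟩
  have hvalEq : ∀ v, parent.contains v = true → d.get? v = some (depth.getD v 0) := by
    intro v hcA
    obtain ⟨k, hdk, _, _⟩ := hA.hchain v hcA
    obtain ⟨xv, hxv⟩ := pvGetOfContains d v ((hdomAB v).1 hcA)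
    have hxv0 : 0 ≤ xv := (hB.hval v xv hxv).1
    obtain ⟨_, hdle⟩ := hleAB xv.toNat v xv hxv (Int.toNat_of_nonneg hxv0).symm
    obtain ⟨xv', hxv', hxvle⟩ := hleBA k v hcA hdk
    rw [hxv] at hxv'
    cases hxv'
    have : xv = depth.getD v 0 := by omega
    rw [hxv, this]
  have hvne : d.values ≠ [] := by
    intro hnil
    have h1 : (1 : Int) ∈ d.keys :=
      (PySem.Dict.contains_iff_mem_keys _ _).1 ((hdomAB 1).1 (hcontA 1 pvReach.root))
    have : d.keys = [] := by
      have hlen : d.values.length = d.keys.length := by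
        simp [PySem.Dict.values, PySem.Dict.keys]
      rw [hnil] at hlen
      exact List.eq_nil_of_length_eq_zero hlen.symm
    rw [this] at h1
    exact absurd h1 (List.not_mem_nil)
  obtain ⟨m, hm⟩ : ∃ m, PySem.List.max? d.values (fun y => y) = some m := by
    rcases hmm : PySem.List.max? d.values (fun y : Int => y) with _ | m
    · exact absurd ((PySem.List.max?_eq_none_iff _ _).1 hmm) hvne
    · exact ⟨m, rfl⟩
  have hmmem : m ∈ d.values := PySem.List.max?_mem hm
  have hmle : m ≤ md := by
    rw [PySem.Dict.values_eq_map_keys d hB.hnodup 0] at hmmem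
    obtain ⟨w, hwk, hwv⟩ := List.mem_map.1 hmmem
    have hcw : parent.contains w = true :=
      (hdomAB w).2 ((PySem.Dict.contains_iff_mem_keys _ _).2 hwk)
    have hget := hvalEq w hcw
    have : d.getD w 0 = depth.getD w 0 := by
      rw [PySem.Dict.getD_eq_get?_getD, hget]; rfl
    rw [this] at hwv
    rw [← hwv]
    exact hA.hmdmax w hcw
  have hmdmem : md ∈ d.values := by
    have hget := hvalEq x hA.hx
    rw [hA.hmdx] at hget
    have hit := PySem.Dict.mem_items_of_get?_eq_some d hget
    simp only [PySem.Dict.values]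
    exact List.mem_map.2 ⟨(x, md), hit, rfl⟩
  have hmdle : md ≤ m := PySem.List.max?_isMax hm md hmdmem
  rw [hm]
  simp only [Option.getD_some]
  omega

lemma pvInvB_init (edges : List (Int × Int)) :
    pvInvB edges ((PySem.Dict.empty : PySem.Dict Int Int).insert 1 0) := by
  have hsz : ((PySem.Dict.empty : PySem.Dict Int Int).insert 1 0).size = 1 := by
    rw [PySem.Dict.size_insert, PySem.Dict.contains_empty]
    simp [PySem.Dict.size_empty]
  refine { hnodup := PySem.Dict.nodup_keys_insert _ _ _ PySem.Dict.nodup_keys_empty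
           hone := PySem.Dict.get?_insert_self ..
           hval := ?_
           hends := ?_ }
  · intro v x hv
    by_cases h1 : v = 1
    · subst h1
      rw [PySem.Dict.get?_insert_self] at hv
      cases hv
      exact ⟨le_refl _, by rw [hsz]; omega, pvReach.root, Or.inl rfl⟩
    · rw [PySem.Dict.get?_insert_of_ne _ _ h1, PySem.Dict.get?_empty] at hv; cases hv
  · intro v hv
    rw [PySem.Dict.contains_insert] at hv
    rcases Bool.or_eq_true_iff.1 hv with hv | hv
    · exact Or.inl (by simpa using hv)
    · rw [PySem.Dict.contains_empty] at hv; cases hv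

lemma pvPhi_init_lt (edges : List (Int × Int)) :
    pvPhi edges.length ((PySem.Dict.empty : PySem.Dict Int Int).insert 1 0)
      < (2 * edges.length + 1) * (2 * edges.length + 1) := by
  have hnc : (PySem.Dict.empty : PySem.Dict Int Int).contains 1 = false :=
    PySem.Dict.contains_empty ..
  have hkeys : ((PySem.Dict.empty : PySem.Dict Int Int).insert 1 0).keys = [1] := by
    rw [PySem.Dict.keys_insert_of_not_contains _ _ hnc, PySem.Dict.keys_empty]
    rfl
  have hsz : ((PySem.Dict.empty : PySem.Dict Int Int).insert 1 0).size = 1 := by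
    rw [PySem.Dict.size_insert, PySem.Dict.contains_empty]
    simp [PySem.Dict.size_empty]
  unfold pvPhi
  rw [hkeys, hsz]
  simp only [List.map_cons, List.map_nil, List.sum_cons, List.sum_nil,
    PySem.Dict.getD_insert_self]
  have e1 : (2 * edges.length + 1 - 1) * (2 * edges.length + 2)
      = 4 * (edges.length * edges.length) + 4 * edges.length := by
    have : 2 * edges.length + 1 - 1 = 2 * edges.length := by omega
    rw [this]; ring
  have e2 : (2 * edges.length + 1) * (2 * edges.length + 1)
      = 4 * (edges.length * edges.length) + 4 * edges.length + 1 := by ring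
  omega

lemma pvPathA_length (k : Nat) : ∀ (fuel : Nat) (parent : PySem.Dict Int (Option Int)) (v : Int)
    (path : List Int), pvChainOk parent v k → k < fuel →
    (pvPathA fuel parent (some v) path).length = path.length + (k + 1) := by
  induction k with
  | zero =>
    intro fuel parent v path h hf
    obtain ⟨f, rfl⟩ : ∃ f, fuel = f + 1 := ⟨fuel - 1, by omega⟩
    have : parent.getD v none = none := by
      rw [PySem.Dict.getD_eq_get?_getD, h]; rfl
    rw [pvPathA, this]
    cases f <;> simp [pvPathA]
  | succ k ih =>
    intro fuel parent v path h hf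
    obtain ⟨f, rfl⟩ : ∃ f, fuel = f + 1 := ⟨fuel - 1, by omega⟩
    obtain ⟨u, hu, hc⟩ := h
    have : parent.getD v none = some u := by
      rw [PySem.Dict.getD_eq_get?_getD, hu]; rfl
    rw [pvPathA, this, ih f parent u (path ++ [v]) hc (by omega)]
    simp; omega

lemma pvMain (n : Int) (edges : List (Int × Int)) :
    countOddCostPaths n edges = countOddCostPaths_alt n edges := by
  unfold countOddCostPaths countOddCostPaths_alt
  dsimp only
  have hszinit : (PySem.Dict.empty.insert (1 : Int) (none : Option Int)).size = 1 := by
    rw [PySem.Dict.size_insert, PySem.Dict.contains_empty]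
    simp [PySem.Dict.size_empty]
  have hA := pvBFSA_run edges (pvBuildTree edges) (pvBuildTree_mem edges)
    (2 * edges.length + 2) [1] (PySem.Dict.empty.insert 1 none) (PySem.Dict.empty.insert 1 0)
    0 1 (pvInvA_init edges) (by rw [List.length_singleton, hszinit]; omega)
  set r := pvBFSA (2 * edges.length + 2) (pvBuildTree edges) [1]
    (PySem.Dict.empty.insert 1 none) (PySem.Dict.empty.insert 1 0) 0 1 with hr
  obtain ⟨k, hmdk, hchain, hklt⟩ := hA.hchain r.2.2.2 hA.hx
  have hszr : r.1.size ≤ 2 * edges.length + 1 := pvSizeBound r.1 hA.hnodup hA.hends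
  have hlen := pvPathA_length k (2 * edges.length + 2) r.1 r.2.2.2 [] hchain (by omega)
  simp only [List.length_nil, Nat.zero_add] at hlen
  have hmd : r.2.2.1 = (k : Int) := by rw [← hA.hmdx]; exact hmdk
  obtain ⟨hBI, hBF⟩ := pvLoopB_run edges ((2 * edges.length + 1) * (2 * edges.length + 1))
    true ((PySem.Dict.empty : PySem.Dict Int Int).insert 1 0) (pvInvB_init edges)
    (pvPhi_init_lt edges)
  have hbest := pvGlue edges r.1 r.2.1 r.2.2.1 r.2.2.2 hA _ hBI hBF
  rw [List.length_reverse, hlen, hbest, hmd]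
  have hkk : ((k + 1 : Nat) : Int) - 1 = (k : Int) := by push_cast; ring
  rw [hkk]

-- ===== VERDICT (by name: the statement is the Claim_ definition above) =====
theorem countOddCostPaths_spec : Claim_equal_countOddCostPaths := by
  intro n edges _
  show countOddCostPaths n edges = countOddCostPaths_alt n edges
  exact pvMain n edges
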